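-- pv_equiv track=rewrite | github.com/Cytmo/SensitiveInfoExtractor | code/toStringUtils/picUtil.py | pad_2d_list
-- ===== SOURCE A (Python) =====
-- def pad_2d_list(input_2d_list):
--
--     # 找到最长的行的长度
--     max_length = max(len(row) for row in input_2d_list)
--
--     # 遍历二维列表并添加空格
--     padded_list = []
--     for row in input_2d_list:
--         if len(row) < max_length:
--             # 计算需要添加的空格数量
--             num_spaces = max_length - len(row)
--             # 添加空格到当前行
--             padded_row = row + [""] * num_spaces
--             padded_list.append(padded_row)
--         else:
--             padded_list.append(row)
--
--     # 检查每列是否全为空字符串，如果不是则保留该列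
--     filtered_data = [col for col in zip(
--         *padded_list) if any(col) or not all(c == "" for c in col)]
--
--     # 转置筛选后的数据，得到二维列表
--     filtered_data_transposed = [list(col) for col in zip(*filtered_data)]
--
--     return filtered_data_transposed
-- ===== SOURCE B (Python) =====
-- def pad_2d_list(input_2d_list):
--     max_length = max(len(row) for row in input_2d_list)
--
--     def cell(row, j):
--         return row[j] if j < len(row) else ""
--
--     kept = [j for j in range(max_length)
--             if any(cell(row, j) != "" for row in input_2d_list)]
--     if not kept:
--         return []
--     return [[cell(row, j) for j in kept] for row in input_2d_list]
-- ===== Notes on version B (the rewrite author's own statement) =====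
-- stated objective: simpler
-- what changed: Replaces pad + two zip(*) transposes with a kept-column index mask computed in one scan, then a per-row selection pass; no padded intermediate lists are built.
import Mathlib
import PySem

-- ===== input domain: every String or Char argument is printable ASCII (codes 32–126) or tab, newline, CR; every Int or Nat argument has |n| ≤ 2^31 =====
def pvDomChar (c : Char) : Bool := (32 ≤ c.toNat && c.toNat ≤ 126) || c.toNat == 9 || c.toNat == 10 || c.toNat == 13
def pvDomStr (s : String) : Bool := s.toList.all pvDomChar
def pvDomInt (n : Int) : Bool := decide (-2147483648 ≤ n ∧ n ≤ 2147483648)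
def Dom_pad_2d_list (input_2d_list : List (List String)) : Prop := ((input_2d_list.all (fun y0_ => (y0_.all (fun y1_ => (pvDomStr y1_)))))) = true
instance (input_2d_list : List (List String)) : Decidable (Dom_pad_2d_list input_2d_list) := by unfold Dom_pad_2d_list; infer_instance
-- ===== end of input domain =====

-- B replaces A's pad + two zip(*) transposes with a kept-column index mask and a
-- per-row selection pass (objective: simpler).

-- ===== PORT A =====
-- model of Python's zip(*ls) over lists of strings: [] when no argument,
-- otherwise rows truncated to the shortest argument (here used as [list(col) for col in zip(*ls)])
def pyZipStar (ls : List (List String)) : List (List String) :=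
  match ls with
  | [] => []
  | _ :: _ =>
    (List.range (((ls.map List.length).min?).getD 0)).map
      (fun i => ls.map (fun l => l.getD i ""))

def pad_2d_list (input_2d_list : List (List String)) : List (List String) :=
  -- max(len(row) for row in input_2d_list); raises on [] — excluded by Pre_
  let max_length := (PySem.List.max? (input_2d_list.map (fun row => row.length)) (fun x => x)).getD 0
  let padded_list := input_2d_list.map (fun row =>
    if row.length < max_length then
      row ++ List.replicate (max_length - row.length) ""
    else row)
  let filtered_data := (pyZipStar padded_list).filter
    (fun col => col.any (fun c => c != "") || !(col.all (fun c => c == "")))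
  pyZipStar filtered_data

-- ===== PORT B =====
-- cell(row, j) = row[j] if j < len(row) else ""
def pvCell (row : List String) (j : Nat) : String :=
  if j < row.length then row.getD j "" else ""

def pad_2d_list_alt (input_2d_list : List (List String)) : List (List String) :=
  let max_length := (PySem.List.max? (input_2d_list.map (fun row => row.length)) (fun x => x)).getD 0
  let kept := (List.range max_length).filter
    (fun j => input_2d_list.any (fun row => pvCell row j != ""))
  if kept.isEmpty then []
  else input_2d_list.map (fun row => kept.map (fun j => pvCell row j))

-- ===== PRECONDITION & SPEC =====
-- Pre_ excludes only the empty outer list, on which A's max() raises ValueError.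
def Pre_pad_2d_list (input_2d_list : List (List String)) : Prop := input_2d_list ≠ []
instance (input_2d_list : List (List String)) : Decidable (Pre_pad_2d_list input_2d_list) := by
  unfold Pre_pad_2d_list; infer_instance

def pvWitness_pad_2d_list : List (List String) := [["a", "", "b"], ["", "", "c"], [""]]

def Spec_pad_2d_list (input_2d_list : List (List String)) (out : List (List String)) : Prop := out = pad_2d_list_alt input_2d_list
instance (input_2d_list : List (List String)) (out : List (List String)) : Decidable (Spec_pad_2d_list input_2d_list out) := by unfold Spec_pad_2d_list; infer_instance

-- ===== CLAIM (what is proved, stated in full; the proofs are below) =====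
def Claim_equal_pad_2d_list : Prop := ∀ (input_2d_list : List (List String)), Dom_pad_2d_list input_2d_list → Pre_pad_2d_list input_2d_list → Spec_pad_2d_list input_2d_list (pad_2d_list input_2d_list)

-- ===== LEMMAS AND PROOFS =====

theorem min?_replicate (n m : Nat) : (List.replicate (n+1) m).min? = some m := by
  induction n with
  | zero => rfl
  | succ k ih =>
    rw [List.replicate_succ, List.min?_cons, ih]
    simp

theorem cond_eq (col : List String) :
    (col.any (fun c => c != "") || !(col.all (fun c => c == ""))) = col.any (fun c => c != "") := by
  cases hc : col.any (fun c => c != "")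
  · simp_all
    exact hc
  · simp

theorem key (x : List String) (t : List (List String)) (M : Nat)
    (hmax : ∀ row ∈ x :: t, row.length ≤ M) :
    pyZipStar ((pyZipStar ((x :: t).map (fun row =>
        if row.length < M then row ++ List.replicate (M - row.length) "" else row))).filter
        (fun col => col.any (fun c => c != "") || !(col.all (fun c => c == "")))) =
    (if ((List.range M).filter (fun j => (x :: t).any (fun row => pvCell row j != ""))).isEmpty then []
     else (x :: t).map (fun row =>
       ((List.range M).filter (fun j => (x :: t).any (fun row => pvCell row j != ""))).map
         (fun j => pvCell row j))) := by
  set pad := fun row : List String =>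
    if row.length < M then row ++ List.replicate (M - row.length) "" else row with hpaddef
  have hplen : ∀ row ∈ x :: t, (pad row).length = M := by
    intro row hr
    have h1 := hmax row hr
    by_cases hc : row.length < M
    · simp [hpaddef, hc]
      omega
    · simp [hpaddef, hc]
      omega
  have hpget : ∀ row ∈ x :: t, ∀ j < M, (pad row).getD j "" = pvCell row j := by
    intro row hr j hj
    have h1 := hmax row hr
    unfold pvCell
    by_cases hc : row.length < M
    · simp only [hpaddef, if_pos hc]
      by_cases hjr : j < row.length
      · simp [List.getD, List.getElem?_append_left hjr, List.getElem?_eq_getElem hjr]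
        exact fun h => absurd h (Nat.not_le.mpr hjr)
      · have hle : row.length ≤ j := Nat.le_of_not_lt hjr
        have hjm : j - row.length < M - row.length := by omega
        simp [List.getD, List.getElem?_append_right hle, hjm, hjr]
    · have heq : row.length = M := Nat.le_antisymm h1 (Nat.le_of_not_lt hc)
      simp [hpaddef, heq, hj]
  -- step 1
  set colFn := fun j => (x :: t).map (fun row => pvCell row j) with hcolFn
  have h1 : pyZipStar ((x :: t).map pad) = (List.range M).map colFn := by
    have hlens : ((x :: t).map pad).map List.length = List.replicate (t.length + 1) M := by
      rw [List.map_map]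
      rw [show List.map (List.length ∘ pad) (x :: t) = List.map (fun _ => M) (x :: t) from
        List.map_congr_left (fun row hr => hplen row hr)]
      simp [List.map_const', List.replicate_succ]
    rw [show (x :: t).map pad = pad x :: t.map pad from rfl]
    show (List.range (((pad x :: t.map pad).map List.length).min?.getD 0)).map _ = _
    rw [show pad x :: t.map pad = (x :: t).map pad from rfl, hlens, min?_replicate]
    simp only [Option.getD_some]
    apply List.map_congr_left
    intro j hj
    rw [List.map_map]
    exact List.map_congr_left (fun row hr => hpget row hr j (List.mem_range.mp hj))
  rw [h1]
  -- step 2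
  rw [List.filter_congr (fun col _ => cond_eq col)]
  rw [List.filter_map]
  have hpred : ∀ j, ((fun col => col.any (fun c => c != "")) ∘ colFn) j
      = (x :: t).any (fun row => pvCell row j != "") := by
    intro j
    simp [hcolFn, List.any_map, Function.comp_def]
  rw [List.filter_congr (fun j _ => hpred j)]
  -- step 3
  set K := (List.range M).filter (fun j => (x :: t).any (fun row => pvCell row j != "")) with hK
  by_cases hKe : K = []
  · simp [hKe, pyZipStar]
  · obtain ⟨k, ks, hKc⟩ := List.exists_cons_of_ne_nil hKe
    rw [if_neg (by simp [hKe])]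
    have hlens2 : (K.map colFn).map List.length = List.replicate K.length (t.length + 1) := by
      rw [List.map_map]
      rw [show (List.length ∘ colFn) = fun _ => t.length + 1 by
        funext j; simp [hcolFn]]
      simp [List.map_const']
    have hKlen : K.length = ks.length + 1 := by rw [hKc]; rfl
    have hzip : pyZipStar (K.map colFn)
        = (List.range (t.length + 1)).map (fun i => (K.map colFn).map (fun col => col.getD i "")) := by
      rw [hKc]
      show (List.range ((((colFn k :: ks.map colFn)).map List.length).min?.getD 0)).map _ = _
      rw [show colFn k :: ks.map colFn = (k :: ks).map colFn from rfl, ← hKc, hlens2, hKlen,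
        min?_replicate]
      rfl
    rw [hzip]
    apply List.ext_getElem
    · simp
    · intro i h1i h2i
      simp only [List.getElem_map, List.getElem_range, List.map_map]
      apply List.map_congr_left
      intro j hjK
      have hi : i < (colFn j).length := by simp [hcolFn]; simpa using h2i
      show (colFn j).getD i "" = pvCell _ j
      rw [List.getD_eq_getElem _ _ hi]
      exact List.getElem_map _

theorem pad_2d_list_equiv (l : List (List String)) (h : l ≠ []) :
    pad_2d_list l = pad_2d_list_alt l := by
  obtain ⟨x, t, rfl⟩ := List.exists_cons_of_ne_nil h
  have hmax : ∀ row ∈ x :: t,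
      row.length ≤ (PySem.List.max? ((x :: t).map (fun row => row.length)) (fun x => x)).getD 0 := by
    obtain ⟨v, hv⟩ : ∃ v, PySem.List.max? ((x :: t).map (fun row => row.length)) (fun x => x) = some v := by
      cases he : PySem.List.max? ((x :: t).map (fun row => row.length)) (fun x => x) with
      | none => rw [PySem.List.max?_eq_none_iff] at he; simp at he
      | some v => exact ⟨v, rfl⟩
    intro row hr
    rw [hv]
    simpa using PySem.List.max?_isMax hv row.length (List.mem_map_of_mem hr)
  simp only [pad_2d_list, pad_2d_list_alt]
  exact key x t _ hmax

-- ===== VERDICT (by name: the statement is the Claim_ definition above) =====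
theorem pad_2d_list_spec : Claim_equal_pad_2d_list := by
  intro l _ hpre
  unfold Spec_pad_2d_list
  exact pad_2d_list_equiv l hpre
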